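-- pv_equiv track=rewrite | github.com/Gozzo18/WSD-Final-Homework---NLP | NLP Homework 3 - Riccardo Gozzovelli/code/source code/CleanAndOrder.py | sortAndGroup
-- ===== SOURCE A (Python) =====
-- def sortAndGroup(sentences, labels, isTrain):
--
--     """
--     Sort the sentence and label lista by the length attribute of each element
--
--     :param sentences: list of splitted sentences
--     :param labels: list of splitted labels
--     :param isTrain: boolean value used to distinguish between train and dev set
--     :return sorted_sentences: ordered list of splitted sentences
--     :return sorted_labels: ordered list of splitted labels
--
--     """
--
--     sorted_sentences = sorted(sentences, key=len)
--     if labels: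
--         sorted_labels = sorted(labels, key=len)
--
--     #Remove identifier from sorted list
--     if isTrain:
--         for i in range(len(sorted_sentences)):
--             sorted_sentences[i] = sorted_sentences[i][:-1]
--
--     grouped_sentences_vocab={}
--     for sentence in sorted_sentences:
--         grouped_sentences_vocab.setdefault(len(sentence), []).append(sentence)
--
--     grouped_sentences_by_length = [grouped_sentences_vocab[n] for n in sorted(grouped_sentences_vocab)]
--
--     return sorted_sentences, sorted_labels, grouped_sentences_by_length
-- ===== SOURCE B (Python) =====
-- def sortAndGroup(sentences, labels, isTrain):
--     sorted_sentences = sorted(sentences, key=len)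
--     if labels:
--         sorted_labels = sorted(labels, key=len)
--
--     if isTrain:
--         sorted_sentences = [s[:-1] for s in sorted_sentences]
--
--     # Equal lengths are contiguous after sorting (truncation keeps the order),
--     # so one forward pass over consecutive runs replaces the dict + key re-sort.
--     grouped_sentences_by_length = []
--     for s in sorted_sentences:
--         if grouped_sentences_by_length and len(grouped_sentences_by_length[-1][0]) == len(s):
--             grouped_sentences_by_length[-1].append(s)
--         else:
--             grouped_sentences_by_length.append([s])
--
--     return sorted_sentences, sorted_labels, grouped_sentences_by_length
-- ===== Notes on version B (the rewrite author's own statement) =====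
-- stated objective: simpler
-- what changed: A groups by building a dict keyed by length and then re-sorting its keys; B makes one forward pass over the already length-sorted list, extending the current run or starting a new group, with no dict and no second sort.
import Mathlib
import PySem

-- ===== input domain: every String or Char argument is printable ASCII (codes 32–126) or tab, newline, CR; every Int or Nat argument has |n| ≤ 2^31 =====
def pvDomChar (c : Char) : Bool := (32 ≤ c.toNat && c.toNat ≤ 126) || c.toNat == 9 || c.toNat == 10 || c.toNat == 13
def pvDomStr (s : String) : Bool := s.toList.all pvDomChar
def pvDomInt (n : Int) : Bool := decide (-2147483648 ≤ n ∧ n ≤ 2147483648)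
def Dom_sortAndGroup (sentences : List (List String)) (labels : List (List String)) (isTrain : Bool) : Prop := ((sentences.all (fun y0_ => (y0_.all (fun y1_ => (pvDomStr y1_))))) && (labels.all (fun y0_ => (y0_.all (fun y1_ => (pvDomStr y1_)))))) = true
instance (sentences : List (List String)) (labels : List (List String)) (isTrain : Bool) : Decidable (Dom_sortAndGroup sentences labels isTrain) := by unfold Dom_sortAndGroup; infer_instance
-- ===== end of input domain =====

-- B replaces A's dict-of-groups plus re-sorted-keys grouping by a single forward pass over
-- consecutive equal-length runs of the already length-sorted list (objective: simpler).

-- ===== PORT A =====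
def sortAndGroup (sentences : List (List String)) (labels : List (List String)) (isTrain : Bool) : List (List String) × List (List String) × List (List (List String)) :=
  let sorted_sentences := PySem.List.sorted sentences (fun s => (s.length : Int)) false
  -- 'if labels:' — with labels = [] Python leaves sorted_labels unbound and the return raises
  -- UnboundLocalError (excluded by Pre_); inside Pre_ the branch is always taken.
  let sorted_labels := PySem.List.sorted labels (fun l => (l.length : Int)) false
  -- for i in range(len(sorted_sentences)): sorted_sentences[i] = sorted_sentences[i][:-1]
  let sorted_sentences2 :=
    if isTrain then
      (PySem.List.pyRange 0 (sorted_sentences.length : Int) 1).foldl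
        (fun acc i =>
          PySem.List.pySetD acc i (PySem.List.slice (PySem.List.pyGetD acc i []) none (some (-1))))
        sorted_sentences
    else sorted_sentences
  let vocab : PySem.Dict Int (List (List String)) :=
    sorted_sentences2.foldl
      (fun d s => d.modify ((s.length : Int)) [] (fun g => g ++ [s])) PySem.Dict.empty
  let grouped_sentences_by_length :=
    (PySem.List.sorted vocab.keys (fun n => n) false).map (fun n => vocab.getD n [])
  (sorted_sentences2, sorted_labels, grouped_sentences_by_length)

-- ===== PORT B =====
def sortAndGroup_alt (sentences : List (List String)) (labels : List (List String)) (isTrain : Bool) : List (List String) × List (List String) × List (List (List String)) :=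
  let sorted_sentences := PySem.List.sorted sentences (fun s => (s.length : Int)) false
  let sorted_labels := PySem.List.sorted labels (fun l => (l.length : Int)) false
  let sorted_sentences2 :=
    if isTrain then sorted_sentences.map (fun s => PySem.List.slice s none (some (-1)))
    else sorted_sentences
  let grouped_sentences_by_length :=
    sorted_sentences2.foldl
      (fun acc s =>
        if acc ≠ [] ∧ (PySem.List.pyGetD (PySem.List.pyGetD acc (-1) []) 0 []).length = s.length
        then acc.dropLast ++ [PySem.List.pyGetD acc (-1) [] ++ [s]]
        else acc ++ [[s]])
      []
  (sorted_sentences2, sorted_labels, grouped_sentences_by_length)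

-- ===== PRECONDITION & SPEC =====
-- Pre_ excludes labels = [] only: there Python A (and B) raises UnboundLocalError, returning no value.
def Pre_sortAndGroup (sentences : List (List String)) (labels : List (List String)) (isTrain : Bool) : Prop := labels ≠ []
instance (sentences : List (List String)) (labels : List (List String)) (isTrain : Bool) : Decidable (Pre_sortAndGroup sentences labels isTrain) := by unfold Pre_sortAndGroup; infer_instance
def pvWitness_sortAndGroup : List (List String) × List (List String) × Bool := ([["a", "id1"], ["b", "c", "id2"]], [["x"]], true)

def Spec_sortAndGroup (sentences : List (List String)) (labels : List (List String)) (isTrain : Bool) (out : List (List String) × List (List String) × List (List (List String))) : Prop := out = sortAndGroup_alt sentences labels isTrain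
instance (sentences : List (List String)) (labels : List (List String)) (isTrain : Bool) (out : List (List String) × List (List String) × List (List (List String))) : Decidable (Spec_sortAndGroup sentences labels isTrain out) := by unfold Spec_sortAndGroup; infer_instance

-- ===== CLAIM (what is proved, stated in full; the proofs are below) =====
def Claim_equal_sortAndGroup : Prop := ∀ (sentences : List (List String)) (labels : List (List String)) (isTrain : Bool), Dom_sortAndGroup sentences labels isTrain → Pre_sortAndGroup sentences labels isTrain → Spec_sortAndGroup sentences labels isTrain (sortAndGroup sentences labels isTrain)

-- ===== LEMMAS AND PROOFS =====

-- length of a sentence, as the Python int key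
def pvKey (s : List String) : Int := (s.length : Int)

-- the canonical grouping both programs compute on a length-sorted list
def pvG (l : List (List String)) : List (List (List String)) :=
  (PySem.Set.ofList (l.map pvKey)).map (fun c => l.filter (fun s => pvKey s == c))

-- B's loop body
def pvStepB (acc : List (List (List String))) (s : List String) : List (List (List String)) :=
  if acc ≠ [] ∧ (PySem.List.pyGetD (PySem.List.pyGetD acc (-1) []) 0 []).length = s.length
  then acc.dropLast ++ [PySem.List.pyGetD acc (-1) [] ++ [s]]
  else acc ++ [[s]]

-- A's in-place truncation loop is a map of s[:-1] over the list
theorem pv_loop_trunc (post pre : List (List String)) :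
    (PySem.List.pyRange (pre.length : Int) ((pre.length : Int) + (post.length : Int)) 1).foldl
      (fun acc i =>
        PySem.List.pySetD acc i (PySem.List.slice (PySem.List.pyGetD acc i []) none (some (-1))))
      (pre ++ post)
    = pre ++ post.map List.dropLast := by
  induction post generalizing pre with
  | nil => simp [PySem.List.pyRange_one_eq_nil]
  | cons x rest ih =>
    rw [PySem.List.pyRange_one_cons (by push_cast [List.length_cons]; omega)]
    rw [List.foldl_cons]
    have hget : PySem.List.pyGetD (pre ++ x :: rest) (pre.length : Int) [] = x := by
      simp [PySem.List.pyGetD_natCast, List.getD]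
    have hset : PySem.List.pySetD (pre ++ x :: rest) (pre.length : Int)
        (PySem.List.slice x none (some (-1))) = pre ++ x.dropLast :: rest := by
      simp [PySem.List.pySetD_natCast, PySem.List.slice_to_neg_one]
    rw [hget, hset]
    have h2 : pre ++ x.dropLast :: rest = (pre ++ [x.dropLast]) ++ rest := by simp
    have h3 : ((pre.length : Int) + 1) = (((pre ++ [x.dropLast]).length : Nat) : Int) := by
      push_cast [List.length_append]; simp
    have h4 : ((pre.length : Int) + (((x :: rest).length : Nat) : Int)) =
        (((pre ++ [x.dropLast]).length : Nat) : Int) + (rest.length : Int) := by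
      simp; omega
    rw [h2, h3, h4, ih (pre ++ [x.dropLast])]
    simp

-- in a strictly increasing Int list, a member bounding the list above is its last element
theorem pv_last_of_max (L : List Int) (k : Int) (hp : L.Pairwise (· < ·)) (hm : k ∈ L)
    (hle : ∀ c ∈ L, c ≤ k) : L.getLast? = some k := by
  induction L with
  | nil => simp at hm
  | cons a L ih =>
    match L, ih, hp, hm, hle with
    | [], _, _, hm, hle => simp at hm ⊢; omega
    | b :: L', ih, hp, hm, hle =>
      have hp' := (List.pairwise_cons.mp hp)
      have hk : k ∈ b :: L' := by
        cases hm with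
        | head =>
          exfalso
          have hb : k < b := hp'.1 b (by simp)
          have := hle b (by simp)
          omega
        | tail _ h => exact h
      rw [List.getLast?_cons_cons]
      exact ih hp'.2 hk (fun c hc => hle c (by simp [hc]))

-- the group of a present key is nonempty and its first element carries that key
theorem pv_head_filter_key (m : List (List String)) (c : Int) (hc : c ∈ m.map pvKey) :
    m.filter (fun s => pvKey s == c) ≠ [] ∧
      pvKey (PySem.List.pyGetD (m.filter (fun s => pvKey s == c)) 0 []) = c := by
  obtain ⟨s, hs, hks⟩ := List.mem_map.mp hc
  have hne : m.filter (fun s => pvKey s == c) ≠ [] := by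
    intro h
    have := List.filter_eq_nil_iff.mp h s hs
    simp [hks] at this
  constructor
  · exact hne
  · rcases hf : m.filter (fun s => pvKey s == c) with _ | ⟨h0, t⟩
    · exact absurd hf hne
    · have : h0 ∈ m.filter (fun s => pvKey s == c) := by rw [hf]; simp
      have := List.of_mem_filter this
      simp [PySem.List.pyGetD_zero, List.getD] at *
      omega

-- B's run-collecting fold computes the canonical grouping on a length-sorted list,
-- whose distinct keys are strictly increasing
theorem pv_bfold_eq (l : List (List String)) (h : (l.map pvKey).Pairwise (· ≤ ·)) :
    l.foldl pvStepB [] = pvG l ∧ (PySem.Set.ofList (l.map pvKey)).Pairwise (· < ·) := by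
  induction l using List.reverseRecOn with
  | nil => simp [pvG]
  | append_singleton m x ih =>
    have hmapx : (m ++ [x]).map pvKey = m.map pvKey ++ [pvKey x] := by simp
    have hmx : (m.map pvKey ++ [pvKey x]).Pairwise (· ≤ ·) := by simpa using h
    have hm' : (m.map pvKey).Pairwise (· ≤ ·) := (List.pairwise_append.mp hmx).1
    have hub : ∀ c ∈ m.map pvKey, c ≤ pvKey x := by
      intro c hc
      exact (List.pairwise_append.mp hmx).2.2 c hc (pvKey x) (by simp)
    obtain ⟨ihG, ihP⟩ := ih hm'
    have hfold : (m ++ [x]).foldl pvStepB [] = pvStepB (pvG m) x := by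
      rw [List.foldl_append, ihG]; rfl
    set K := PySem.Set.ofList (m.map pvKey) with hK
    by_cases hmem : pvKey x ∈ m.map pvKey
    · -- key already present: it is the last key; B extends the last group in place
      have hKx : pvKey x ∈ K := (PySem.Set.mem_ofList _ _).mpr hmem
      have hKadd : PySem.Set.add K (pvKey x) = K := PySem.Set.add_of_mem hKx
      have hGmx : pvG (m ++ [x]) =
          List.map (fun c => (m ++ [x]).filter (fun s => pvKey s == c)) K := by
        simp only [pvG, hmapx, PySem.Set.ofList_append_singleton, ← hK, hKadd]
      have hKne : K ≠ [] := by intro h0; rw [h0] at hKx; simp at hKx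
      have hlast : K.getLast? = some (pvKey x) := by
        apply pv_last_of_max K (pvKey x) ihP hKx
        intro c hc
        exact hub c ((PySem.Set.mem_ofList _ _).mp hc)
      have hGne : pvG m ≠ [] := by
        simp only [pvG, ← hK]
        intro h0; rw [List.map_eq_nil_iff.mp h0] at hKne; simp at hKne
      have hlastG : (pvG m).getLast? = some (m.filter (fun s => pvKey s == pvKey x)) := by
        simp only [pvG, ← hK, List.getLast?_map, hlast, Option.map_some]
      have hgetlast : PySem.List.pyGetD (pvG m) (-1) [] = m.filter (fun s => pvKey s == pvKey x) := by
        rw [PySem.List.pyGetD_neg_one (pvG m) [] hGne]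
        exact Option.some_injective _ (by rw [← List.getLast?_eq_some_getLast]; exact hlastG)
      obtain ⟨hfne, hfhead⟩ := pv_head_filter_key m (pvKey x) hmem
      have hcond : ((pvG m) ≠ [] ∧
          (PySem.List.pyGetD (PySem.List.pyGetD (pvG m) (-1) []) 0 []).length = x.length) := by
        refine ⟨hGne, ?_⟩
        rw [hgetlast]
        have := hfhead
        simp only [pvKey] at this
        exact_mod_cast this
      have hstep : pvStepB (pvG m) x =
          (pvG m).dropLast ++ [m.filter (fun s => pvKey s == pvKey x) ++ [x]] := by
        rw [pvStepB, if_pos hcond, hgetlast]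
      have hKsplit : K = K.dropLast ++ [pvKey x] := by
        conv_lhs => rw [← List.dropLast_append_getLast? (pvKey x) hlast]
      have hdropK : ∀ c ∈ K.dropLast, c < pvKey x := by
        intro c hc
        have hPk : K.Pairwise (· < ·) := ihP
        rw [hKsplit] at hPk
        exact (List.pairwise_append.mp hPk).2.2 c hc (pvKey x) (by simp)
      have hSet : PySem.Set.ofList ((m ++ [x]).map pvKey) = K := by
        rw [hmapx, PySem.Set.ofList_append_singleton, ← hK, hKadd]
      refine ⟨?_, by rw [hSet]; exact ihP⟩
      rw [hfold, hstep]
      simp only [pvG, hSet, ← hK, ← List.map_dropLast]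
      conv_rhs => rw [hKsplit]
      rw [List.map_append]
      congr 1
      · apply List.map_congr_left
        intro c hc
        rw [List.filter_append]
        have hlt := hdropK c hc
        have hfx : (pvKey x == c) = false := by
          simp only [pvKey] at hlt ⊢; simp; omega
        simp [hfx]
      · simp [List.filter_append]
    · -- new key: strictly larger than all old keys; B starts a new group
      have hKx : pvKey x ∉ K := fun hc => hmem ((PySem.Set.mem_ofList _ _).mp hc)
      have hKadd : PySem.Set.add K (pvKey x) = K ++ [pvKey x] := PySem.Set.add_of_not_mem hKx
      have hGmx : pvG (m ++ [x]) =
          List.map (fun c => (m ++ [x]).filter (fun s => pvKey s == c)) (K ++ [pvKey x]) := by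
        simp only [pvG, hmapx, PySem.Set.ofList_append_singleton, ← hK, hKadd]
      have hfilx : m.filter (fun s => pvKey s == pvKey x) = [] := by
        apply List.filter_eq_nil_iff.mpr
        intro s hs hbe
        exact hmem (List.mem_map.mpr ⟨s, hs, (by simpa using hbe)⟩)
      have hcond : ¬ ((pvG m) ≠ [] ∧
          (PySem.List.pyGetD (PySem.List.pyGetD (pvG m) (-1) []) 0 []).length = x.length) := by
        rintro ⟨hGne, hlen⟩
        have hKne : K ≠ [] := by
          intro h0
          apply hGne
          simp only [pvG, ← hK, h0, List.map_nil]
        obtain ⟨klast, hklast⟩ := Option.isSome_iff_exists.mp (List.getLast?_isSome.mpr hKne)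
        have hkmem : klast ∈ K := List.mem_of_getLast? hklast
        have hlastG : (pvG m).getLast? = some (m.filter (fun s => pvKey s == klast)) := by
          simp only [pvG, ← hK, List.getLast?_map, hklast, Option.map_some]
        have hgetlast : PySem.List.pyGetD (pvG m) (-1) [] = m.filter (fun s => pvKey s == klast) := by
          rw [PySem.List.pyGetD_neg_one (pvG m) [] hGne]
          exact Option.some_injective _ (by rw [← List.getLast?_eq_some_getLast]; exact hlastG)
        obtain ⟨hfne, hfhead⟩ := pv_head_filter_key m klast ((PySem.Set.mem_ofList _ _).mp hkmem)
        rw [hgetlast] at hlen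
        have hxk : pvKey x = klast := by
          rw [← hfhead]
          simp only [pvKey]
          exact_mod_cast hlen.symm
        exact hKx (hxk ▸ hkmem)
      have hstep : pvStepB (pvG m) x = pvG m ++ [[x]] := by
        rw [pvStepB, if_neg hcond]
      have hSet : PySem.Set.ofList ((m ++ [x]).map pvKey) = K ++ [pvKey x] := by
        rw [hmapx, PySem.Set.ofList_append_singleton, ← hK, hKadd]
      constructor
      · rw [hfold, hstep, hGmx, List.map_append]
        congr 1
        · simp only [pvG, ← hK]
          apply List.map_congr_left
          intro c hc
          have hnec : pvKey x ≠ c := fun he => hKx (he ▸ hc)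
          have hfx : (pvKey x == c) = false := by simp [hnec]
          simp [List.filter_append, hfx]
        · simp [List.filter_append, List.filter_singleton, hfilx]
      · rw [hSet]
        rw [List.pairwise_append]
        refine ⟨ihP, by simp, ?_⟩
        intro c hc c' h2
        simp at h2; subst h2
        have hle := hub c ((PySem.Set.mem_ofList _ _).mp hc)
        have hne : c ≠ pvKey x := fun he => hKx (he ▸ hc)
        omega

-- A's dict-then-sorted-keys grouping also computes the canonical grouping
theorem pv_afold_eq (l : List (List String))
    (hP : (PySem.Set.ofList (l.map pvKey)).Pairwise (· < ·)) :
    (PySem.List.sorted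
        (l.foldl (fun d s => d.modify ((s.length : Int)) [] (fun g => g ++ [s]))
          (PySem.Dict.empty : PySem.Dict Int (List (List String)))).keys (fun n => n) false).map
      (fun n => (l.foldl (fun d s => d.modify ((s.length : Int)) [] (fun g => g ++ [s]))
          (PySem.Dict.empty : PySem.Dict Int (List (List String)))).getD n [])
    = pvG l := by
  set d := l.foldl (fun d s => d.modify ((s.length : Int)) [] (fun g => g ++ [s]))
      (PySem.Dict.empty : PySem.Dict Int (List (List String))) with hd
  have hkeys : d.keys = PySem.Set.ofList (l.map pvKey) := by
    rw [hd]
    have h := PySem.Dict.keys_foldl_modify_key l (fun s : List String => (s.length : Int)) []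
      (fun _ s g => g ++ [s]) PySem.Dict.empty
    simpa [PySem.Set.update_nil_left, pvKey] using h
  have hsorted : PySem.List.sorted d.keys (fun n => n) false = d.keys := by
    apply PySem.List.sorted_eq_self_of_pairwise
    rw [hkeys]
    exact hP.imp (fun h => le_of_lt h)
  have hget : ∀ c : Int, d.getD c [] = l.filter (fun s => pvKey s == c) := by
    intro c
    have h1 : l.foldl (fun d s => d.modify ((s.length : Int)) [] (fun g => g ++ [s]))
        (PySem.Dict.empty : PySem.Dict Int (List (List String)))
        = (l.map (fun s => (((s.length : Int)), s))).foldl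
            (fun d p => d.modify p.1 [] (fun g => g ++ [p.2])) PySem.Dict.empty := by
      rw [List.foldl_map]
    rw [hd, h1, PySem.Dict.getD_foldl_modify_append]
    simp [List.filter_map, Function.comp_def, pvKey]
  rw [hsorted, hkeys, pvG]
  apply List.map_congr_left
  intro c _
  exact hget c

-- ===== VERDICT (by name: the statement is the Claim_ definition above) =====
theorem sortAndGroup_spec : Claim_equal_sortAndGroup := by
  intro sentences labels isTrain _ _
  unfold Spec_sortAndGroup sortAndGroup sortAndGroup_alt
  set S := PySem.List.sorted sentences (fun s => (s.length : Int)) false with hS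
  have hsortP : (S.map pvKey).Pairwise (· ≤ ·) := by
    rw [List.pairwise_map]
    exact PySem.List.sorted_pairwise sentences (fun s => (s.length : Int))
  cases isTrain with
  | false =>
    simp only [if_neg (by simp : ¬ (false = true))]
    obtain ⟨hB, hPlt⟩ := pv_bfold_eq S hsortP
    have hA := pv_afold_eq S hPlt
    refine congrArg (Prod.mk S) (congrArg _ ?_)
    rw [hA, ← hB]
    rfl
  | true =>
    simp only [if_true]
    have hloop : (PySem.List.pyRange 0 (S.length : Int) 1).foldl
        (fun acc i =>
          PySem.List.pySetD acc i (PySem.List.slice (PySem.List.pyGetD acc i []) none (some (-1))))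
        S = S.map List.dropLast := by
      have h := pv_loop_trunc S []
      simpa using h
    have hmapB : S.map (fun s => PySem.List.slice s none (some (-1))) = S.map List.dropLast := by
      apply List.map_congr_left
      intro s _
      exact PySem.List.slice_to_neg_one s
    have hP2 : ((S.map List.dropLast).map pvKey).Pairwise (· ≤ ·) := by
      rw [List.pairwise_map, List.pairwise_map]
      rw [List.pairwise_map] at hsortP
      apply hsortP.imp
      intro a b hab
      simp only [pvKey, List.length_dropLast] at *
      omega
    obtain ⟨hB, hPlt⟩ := pv_bfold_eq (S.map List.dropLast) hP2
    have hA := pv_afold_eq (S.map List.dropLast) hPlt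
    rw [hloop, hmapB]
    refine congrArg (Prod.mk _) (congrArg _ ?_)
    rw [hA, ← hB]
    rfl
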